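-- pv_equiv track=rewrite | github.com/tooooooooomy/competition-programming | at-coder-problems/airport-bus.py | solve
-- ===== SOURCE A (Python) =====
-- def solve(N, C, K, T):
--     a = 1
--     sorted_t = sorted(T, reverse=True)
--     b = sorted_t[0]
--     i = 1
--     t_l = len(T)
--     c = 1
--     while i < t_l:
--         if c < C and b - sorted_t[i] <= K:
--             i += 1
--             c += 1
--         else:
--             b = sorted_t[i]
--             i += 1
--             a += 1
--             c = 1
--
--     return a
-- ===== SOURCE B (Python) =====
-- def solve(N, C, K, T):
--     ts = sorted(T)
--     a = 0
--     i = len(ts) - 1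
--     j = len(ts)
--     while i >= 0:
--         while j > 0 and ts[j - 1] >= ts[i] - K:
--             j -= 1
--         g = min(C, i - j + 1)
--         if g < 1:
--             g = 1
--         a += 1
--         i -= g
--     return a
-- ===== Notes on version B (the rewrite author's own statement) =====
-- stated objective: alternative
-- what changed: Replaces A's per-passenger state machine over a descending sort with an ascending sort plus an amortized two-pointer loop that computes each bus's whole group size at once and jumps the index by it
-- crash fix: On empty T A raises IndexError (indexing sorted_t[0]); B returns 0. — e.g. on solve(0, 1, 1, []): A raises IndexError, B returns 0
import Mathlib
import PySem

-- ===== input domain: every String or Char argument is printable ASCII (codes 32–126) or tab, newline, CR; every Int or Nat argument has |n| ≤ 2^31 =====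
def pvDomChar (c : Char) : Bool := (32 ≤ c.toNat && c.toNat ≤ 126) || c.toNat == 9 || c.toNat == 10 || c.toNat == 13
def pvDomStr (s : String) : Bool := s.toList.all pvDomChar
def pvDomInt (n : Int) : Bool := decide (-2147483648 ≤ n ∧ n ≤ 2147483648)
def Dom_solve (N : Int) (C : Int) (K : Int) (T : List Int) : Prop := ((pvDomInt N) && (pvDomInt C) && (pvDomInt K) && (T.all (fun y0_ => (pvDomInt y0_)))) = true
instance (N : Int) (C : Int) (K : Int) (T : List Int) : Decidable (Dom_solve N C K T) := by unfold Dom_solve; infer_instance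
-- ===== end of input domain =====

-- B replaces A's per-passenger scan of the descending sort with an ascending sort plus a
-- two-pointer loop that computes each bus's group size at once and jumps by it (objective: alternative).

-- ===== PORT A =====
-- A's while loop: structural recursion over the yet-unvisited suffix of sorted_t, same state (a, b, c).
def solveGo (C : Int) (K : Int) (a : Int) (b : Int) (c : Int) : List Int → Int
  | [] => a
  | t :: rest =>
    if c < C ∧ b - t ≤ K then solveGo C K a b (c + 1) rest
    else solveGo C K (a + 1) t 1 rest

def solve (N : Int) (C : Int) (K : Int) (T : List Int) : Int :=
  let sorted_t := PySem.List.sorted T (fun x => x) true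
  match sorted_t with
  | [] => 0          -- Python raises IndexError on sorted_t[0] here; excluded by Pre_solve
  | b :: rest => solveGo C K 1 b 1 rest

-- ===== PORT B =====
-- inner while of Source B: `while j > 0 and ts[j-1] >= x: j -= 1` (x = ts[i] - K); fuel ≥ j suffices.
def innerJ (ts : List Int) (x : Int) : Int → Nat → Int
  | j, 0 => j
  | j, fuel + 1 =>
    if 0 < j ∧ x ≤ PySem.List.pyGetD ts (j - 1) 0 then innerJ ts x (j - 1) fuel
    else j

-- outer while of Source B over (a, i, j); i drops by g ≥ 1 each round, so fuel ≥ ts.length suffices.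
def altGo (ts : List Int) (C : Int) (K : Int) : Int → Int → Int → Nat → Int
  | a, _, _, 0 => a
  | a, i, j, fuel + 1 =>
    if 0 ≤ i then
      let j' := innerJ ts (PySem.List.pyGetD ts i 0 - K) j j.toNat
      let g0 := min C (i - j' + 1)
      let g := if g0 < 1 then 1 else g0
      altGo ts C K (a + 1) (i - g) j' fuel
    else a

def solve_alt (N : Int) (C : Int) (K : Int) (T : List Int) : Int :=
  let ts := PySem.List.sorted T (fun x => x) false
  altGo ts C K 0 ((ts.length : Int) - 1) (ts.length : Int) ts.length

-- ===== PRECONDITION & SPEC =====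
-- Pre_ excludes only the empty list, on which A raises IndexError (sorted_t[0]).
def Pre_solve (N : Int) (C : Int) (K : Int) (T : List Int) : Prop := T ≠ []
instance (N : Int) (C : Int) (K : Int) (T : List Int) : Decidable (Pre_solve N C K T) := by unfold Pre_solve; infer_instance
def pvWitness_solve : Int × Int × Int × List Int := (3, 2, 1, [1, 2, 3])

-- On empty T, A raises IndexError (sorted_t[0]); B returns 0 (no riders need no bus).
def Raises_solve (N : Int) (C : Int) (K : Int) (T : List Int) : Prop := T = []
instance (N : Int) (C : Int) (K : Int) (T : List Int) : Decidable (Raises_solve N C K T) := by unfold Raises_solve; infer_instance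
def pvRaiseWitness_solve : Int × Int × Int × List Int := (0, 1, 1, [])
def pvRaiseWitnessOut_solve : Int := 0

def Spec_solve (N : Int) (C : Int) (K : Int) (T : List Int) (out : Int) : Prop := out = solve_alt N C K T
instance (N : Int) (C : Int) (K : Int) (T : List Int) (out : Int) : Decidable (Spec_solve N C K T out) := by unfold Spec_solve; infer_instance

-- ===== CLAIM (what is proved, stated in full; the proofs are below) =====
def Claim_equal_solve : Prop := ∀ (N : Int) (C : Int) (K : Int) (T : List Int), Dom_solve N C K T → Pre_solve N C K T → Spec_solve N C K T (solve N C K T)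
def Claim_raises_solve : Prop := (∀ (N : Int) (C : Int) (K : Int) (T : List Int), Dom_solve N C K T → Raises_solve N C K T → ¬ Pre_solve N C K T) ∧ (Dom_solve (pvRaiseWitness_solve.1) (pvRaiseWitness_solve.2.1) (pvRaiseWitness_solve.2.2.1) (pvRaiseWitness_solve.2.2.2) ∧ Raises_solve (pvRaiseWitness_solve.1) (pvRaiseWitness_solve.2.1) (pvRaiseWitness_solve.2.2.1) (pvRaiseWitness_solve.2.2.2) ∧ solve_alt (pvRaiseWitness_solve.1) (pvRaiseWitness_solve.2.1) (pvRaiseWitness_solve.2.2.1) (pvRaiseWitness_solve.2.2.2) = pvRaiseWitnessOut_solve)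

-- ===== LEMMAS AND PROOFS =====

-- Common abstraction both proofs land on: bus count of a descending list, group by group.
def buses (C : Int) (K : Int) : List Int → Int
  | [] => 0
  | b :: rest =>
      1 + buses C K (rest.drop (min (C - 1).toNat (rest.takeWhile (fun t => decide (b - t ≤ K))).length))
termination_by l => l.length
decreasing_by
  simp only [List.length_cons, List.length_drop]
  omega

-- A's loop processes a whole group in one conceptual jump.
theorem solveGo_jump (C K : Int) : ∀ (l : List Int) (c a b : Int),
    solveGo C K a b c l =
      match l.drop (min (C - c).toNat (l.takeWhile (fun t => decide (b - t ≤ K))).length) with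
      | [] => a
      | t :: rest => solveGo C K (a + 1) t 1 rest := by
  intro l
  induction l with
  | nil => intro c a b; simp [solveGo]
  | cons t rest ih =>
    intro c a b
    by_cases h : c < C ∧ b - t ≤ K
    · have h1 : (decide (b - t ≤ K)) = true := by simp [h.2]
      have hc : c < C := h.1
      have hmin : min (C - c).toNat ((t :: rest).takeWhile (fun s => decide (b - s ≤ K))).length
          = min (C - (c + 1)).toNat ((rest.takeWhile (fun s => decide (b - s ≤ K))).length) + 1 := by
        simp only [List.takeWhile_cons, h1, if_true, List.length_cons]
        omega
      rw [show solveGo C K a b c (t :: rest) = solveGo C K a b (c + 1) rest by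
            simp [solveGo, h]]
      rw [hmin]
      simp only [List.drop_succ_cons]
      exact ih (c + 1) a b
    · have hz : min (C - c).toNat ((t :: rest).takeWhile (fun s => decide (b - s ≤ K))).length = 0 := by
        by_cases hcC : c < C
        · have hbt : ¬ (b - t ≤ K) := fun hb => h ⟨hcC, hb⟩
          simp [List.takeWhile_cons, hbt] <;> omega
        · have h0 : (C - c).toNat = 0 := by omega
          simp [h0]
      rw [hz]
      simp only [List.drop_zero]
      rw [show solveGo C K a b c (t :: rest) = solveGo C K (a + 1) t 1 rest from by
        simp only [solveGo]
        rw [if_neg h]]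

theorem solveGo_eq_buses (C K : Int) : ∀ (n : Nat) (l : List Int), l.length ≤ n → ∀ (a b : Int),
    solveGo C K a b 1 l = a + buses C K (b :: l) - 1 := by
  intro n
  induction n with
  | zero =>
    intro l hl a b
    have hnil : l = [] := by
      cases l with
      | nil => rfl
      | cons x xs => simp at hl
    subst hnil
    simp [solveGo, buses]
  | succ n ih =>
    intro l hl a b
    rw [solveGo_jump, buses]
    cases hdr : l.drop (min (C - 1).toNat ((l.takeWhile (fun t => decide (b - t ≤ K))).length)) with
    | nil => simp [buses]
    | cons t rest =>
      have hlen : rest.length ≤ n := by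
        have h1 := congrArg List.length hdr
        simp only [List.length_drop, List.length_cons] at h1
        omega
      have hstep : (match t :: rest with
          | [] => a
          | t :: rest => solveGo C K (a + 1) t 1 rest) = solveGo C K (a + 1) t 1 rest := rfl
      rw [hstep, ih rest hlen (a + 1) t]
      omega

-- index / countP characterisation of a sorted (ascending) list
theorem cnt_iff {l : List Int} (hs : l.Pairwise (· ≤ ·)) (x : Int) :
    ∀ (k : Nat), (hk : k < l.length) →
    (l[k] < x ↔ k < l.countP (fun t => decide (t < x))) := by
  induction l with
  | nil => intro k hk; simp at hk
  | cons h t ih =>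
    obtain ⟨hh, ht⟩ := List.pairwise_cons.mp hs
    intro k hk
    have hzero : ¬ h < x → t.countP (fun s => decide (s < x)) = 0 := by
      intro hx
      refine List.countP_eq_zero.mpr (fun a ha => ?_)
      have := hh a ha
      simp only [decide_eq_true_eq]
      omega
    cases k with
    | zero =>
      by_cases hx : h < x
      · simp [List.countP_cons, hx]
      · simp [List.countP_cons, hx, hzero hx]
    | succ k =>
      have hk' : k < t.length := by simpa using hk
      by_cases hx : h < x
      · simp only [List.getElem_cons_succ, List.countP_cons, hx, decide_true, if_true]
        rw [ih ht k hk']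
        omega
      · have h0 := hzero hx
        have hmem : t[k] ∈ t := List.getElem_mem hk'
        have hle : h ≤ t[k] := hh _ hmem
        have hcp : (h :: t).countP (fun s => decide (s < x)) = 0 := by
          rw [List.countP_cons]
          simp [h0, hx]
        rw [List.getElem_cons_succ, hcp]
        constructor
        · intro hlt; omega
        · intro hlt; omega

theorem takeWhile_len_eq_countP (p : Int → Bool)
    (hmono : ∀ x y : Int, y ≤ x → p y = true → p x = true) :
    ∀ (l : List Int), l.Pairwise (fun a b => b ≤ a) →
    (l.takeWhile p).length = l.countP p := by
  intro l
  induction l with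
  | nil => intro _; simp
  | cons h t ih =>
    intro hs
    obtain ⟨hh, ht⟩ := List.pairwise_cons.mp hs
    by_cases ph : p h = true
    · simp [List.takeWhile_cons, ph, List.countP_cons, ih ht]
    · have h0 : t.countP p = 0 := by
        refine List.countP_eq_zero.mpr (fun a ha => ?_)
        intro hpa
        exact ph (hmono h a (hh a ha) hpa)
      simp [List.takeWhile_cons, ph, List.countP_cons, h0]

-- complementary counts for the window predicate
theorem countP_window_compl (b K : Int) : ∀ (l : List Int),
    l.countP (fun t => decide (b - t ≤ K)) + l.countP (fun t => decide (t < b - K)) = l.length := by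
  intro l
  induction l with
  | nil => simp
  | cons h t ih =>
    simp only [List.countP_cons, List.length_cons]
    by_cases hp : b - h ≤ K
    · have e1 : (decide (b - h ≤ K)) = true := by simp [hp]
      have e2 : (decide (h < b - K)) = false := by simp; omega
      rw [e1, e2]
      simp only [eq_self_iff_true, if_true, Bool.false_eq_true, if_false]
      omega
    · have e1 : (decide (b - h ≤ K)) = false := by simp [hp]
      have e2 : (decide (h < b - K)) = true := by simp; omega
      rw [e1, e2]
      simp only [eq_self_iff_true, if_true, Bool.false_eq_true, if_false]
      omega

-- the inner two-pointer while loop lands exactly on the count of elements < x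
theorem innerJ_eq {asc : List Int} (hs : asc.Pairwise (· ≤ ·)) (x : Int) :
    ∀ (fuel : Nat) (j : Int),
    ((asc.countP (fun t => decide (t < x)) : Int) ≤ j) → (j ≤ (asc.length : Int)) →
    ((j - (asc.countP (fun t => decide (t < x)) : Int)).toNat ≤ fuel) →
    innerJ asc x j fuel = (asc.countP (fun t => decide (t < x)) : Int) := by
  intro fuel
  induction fuel with
  | zero =>
    intro j h1 h2 h3
    have : j = (asc.countP (fun t => decide (t < x)) : Int) := by omega
    simp [innerJ, this]
  | succ fuel ih =>
    intro j h1 h2 h3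
    by_cases hcond : 0 < j ∧ x ≤ PySem.List.pyGetD asc (j - 1) 0
    · have hj1 : (0 : Int) ≤ j - 1 := by omega
      have hj2 : j - 1 < (asc.length : Int) := by omega
      have hget : PySem.List.pyGetD asc (j - 1) 0 = asc[(j - 1).toNat]'(by omega) :=
        PySem.List.pyGetD_eq_getElem asc 0 hj1 hj2
      have hcnt : (asc.countP (fun t => decide (t < x)) : Int) ≤ j - 1 := by
        by_contra hcon
        push_neg at hcon
        have hklt : (j - 1).toNat < asc.countP (fun t => decide (t < x)) := by omega
        have := (cnt_iff hs x (j - 1).toNat (by omega)).mpr hklt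
        rw [hget] at hcond
        omega
      rw [show innerJ asc x j (fuel + 1) = innerJ asc x (j - 1) fuel by simp [innerJ, hcond]]
      exact ih (j - 1) hcnt (by omega) (by omega)
    · rw [show innerJ asc x j (fuel + 1) = j by simp [innerJ, hcond]]
      by_cases hj0' : j ≤ 0
      · omega
      · have hj0 : 0 < j := by omega
        have hj1 : (0 : Int) ≤ j - 1 := by omega
        have hj2 : j - 1 < (asc.length : Int) := by omega
        have hget : PySem.List.pyGetD asc (j - 1) 0 = asc[(j - 1).toNat]'(by omega) :=
          PySem.List.pyGetD_eq_getElem asc 0 hj1 hj2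
        have hlt : asc[(j - 1).toNat]'(by omega) < x := by
          by_contra hcon
          exact hcond ⟨hj0, by rw [hget]; omega⟩
        have := (cnt_iff hs x (j - 1).toNat (by omega)).mp hlt
        omega

theorem reverse_drop_cons {l : List Int} {m : Nat} (hm : m < l.length) :
    l.reverse.drop m =
      l[l.length - m - 1]'(by omega) :: (l.take (l.length - m - 1)).reverse := by
  have h1 : l.reverse.drop m = (l.take (l.length - m)).reverse := by
    conv_lhs => rw [show m = l.length - (l.length - m) from by omega]
    rw [← List.reverse_take]
  have h2 : l.take (l.length - m) = l.take (l.length - m - 1) ++ [l[l.length - m - 1]'(by omega)] := by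
    conv_lhs => rw [show l.length - m = (l.length - m - 1) + 1 from by omega]
    exact List.take_succ_eq_append_getElem (by omega)
  rw [h1, h2, List.reverse_append]
  simp

-- B's outer loop equals `buses` of the descending list
theorem altGo_eq_buses {asc : List Int} (hs : asc.Pairwise (· ≤ ·)) (C K : Int) :
    ∀ (fuel : Nat) (m : Nat) (a j : Int), m ≤ asc.length → asc.length - m ≤ fuel →
    (∀ hm : m < asc.length,
      ((asc.countP (fun t => decide (t < asc[asc.length - m - 1]'(by omega) - K)) : Int) ≤ j ∧
        j ≤ (asc.length : Int))) →
    altGo asc C K a ((asc.length : Int) - m - 1) j fuel = a + buses C K (asc.reverse.drop m) := by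
  intro fuel
  induction fuel with
  | zero =>
    intro m a j hm hf _
    have hdrop : asc.reverse.drop m = [] := List.drop_eq_nil_of_le (by simp; omega)
    simp [altGo, hdrop, buses]
  | succ fuel ih =>
    intro m a j hmn hf hj
    by_cases hlt : m < asc.length
    · have hin : asc.length - m - 1 < asc.length := by omega
      have hpos : (0 : Int) ≤ (asc.length : Int) - m - 1 := by omega
      have hposlt : ((asc.length : Int) - m - 1) < (asc.length : Int) := by omega
      have htoNat : ((asc.length : Int) - m - 1).toNat = asc.length - m - 1 := by omega
      have hgetD : PySem.List.pyGetD asc ((asc.length : Int) - m - 1) 0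
          = asc[asc.length - m - 1]'hin := by
        rw [PySem.List.pyGetD_eq_getElem asc 0 hpos hposlt]
        congr 1
      obtain ⟨hj1, hj2⟩ := hj hlt
      -- abbreviations (term-level)
      have hinner : innerJ asc (PySem.List.pyGetD asc ((asc.length : Int) - m - 1) 0 - K) j j.toNat
          = (asc.countP (fun t => decide (t < asc[asc.length - m - 1]'hin - K)) : Int) := by
        rw [hgetD]
        exact innerJ_eq hs _ j.toNat j hj1 hj2 (by omega)
      have hdm : asc.reverse.drop m
          = asc[asc.length - m - 1]'hin :: (asc.take (asc.length - m - 1)).reverse :=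
        reverse_drop_cons hlt
      -- notation
      set i : Nat := asc.length - m - 1 with hidef
      set b : Int := asc[i]'hin with hbdef
      set cP : Nat := asc.countP (fun t => decide (t < b - K)) with hcPdef
      set w : Nat := (((asc.take i).reverse).takeWhile (fun t => decide (b - t ≤ K))).length with hwdef
      have hwcount : w = (asc.take i).countP (fun t => decide (b - t ≤ K)) := by
        rw [hwdef, takeWhile_len_eq_countP _ (fun x y hxy hp => by
            simp only [decide_eq_true_eq] at hp ⊢; omega) _
          (List.pairwise_reverse.mpr ((hs.sublist (List.take_sublist ..))))]
        exact List.countP_reverse ..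
      have hwle : w ≤ i := by
        have h1 : w ≤ ((asc.take i).reverse).length := (List.takeWhile_sublist _).length_le
        simp at h1
        omega
      have htake_len : (asc.take i).length = i := by simp; omega
      -- group size: B's jump = 1 + A's extra count
      have hg : (if min C (((asc.length : Int) - m - 1) - (cP : Int) + 1) < 1 then (1 : Int)
            else min C (((asc.length : Int) - m - 1) - (cP : Int) + 1))
          = 1 + ((min (C - 1).toNat w : Nat) : Int) := by
        by_cases hK : 0 ≤ K
        · -- window contains the anchor: cP ≤ i and w = i - cP
          have hcle : cP ≤ i := by
            by_contra hcon
            push_neg at hcon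
            have := (cnt_iff hs (b - K) i hin).mpr hcon
            omega
          have hdropZero : (asc.drop i).countP (fun t => decide (t < b - K)) = 0 := by
            refine List.countP_eq_zero.mpr (fun t ht => ?_)
            obtain ⟨k, hk, rfl⟩ := List.mem_iff_getElem.mp ht
            have hik : i + k < asc.length := by simp at hk; omega
            rw [List.getElem_drop]
            have hnot : ¬ (i + k < cP) := by omega
            have := (cnt_iff hs (b - K) (i + k) hik).mp
            simp only [decide_eq_true_eq]
            intro hcontra
            exact hnot ((cnt_iff hs (b - K) (i + k) hik).mp hcontra)
          have hsplit : cP = (asc.take i).countP (fun t => decide (t < b - K)) := by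
            have h1 : cP = (asc.take i).countP (fun t => decide (t < b - K))
                + (asc.drop i).countP (fun t => decide (t < b - K)) := by
              rw [hcPdef]
              conv_lhs => rw [← List.take_append_drop i asc]
              exact List.countP_append ..
            omega
          have hcompl := countP_window_compl b K (asc.take i)
          have hwv : w = i - cP := by
            rw [hwcount]
            omega
          rw [show (((asc.length : Int) - m - 1) - (cP : Int) + 1) = ((i : Int) - cP + 1) from by omega]
          split_ifs with hsp <;> omega
        · -- K < 0 : no rider fits with the anchor
          have hKlt : K < 0 := by omega
          have hw0 : w = 0 := by
            rw [hwcount]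
            refine List.countP_eq_zero.mpr (fun t ht => ?_)
            obtain ⟨k, hk, rfl⟩ := List.mem_iff_getElem.mp ht
            have hki : k < i := by simp at hk; omega
            rw [List.getElem_take]
            have hle : asc[k]'(by omega) ≤ b := by
              rw [hbdef]
              exact List.pairwise_iff_getElem.mp hs k i (by omega) hin hki
            simp only [decide_eq_true_eq]
            omega
          have hcge : i < cP := by
            have hblt : asc[i]'hin < b - K := by rw [← hbdef]; omega
            exact (cnt_iff hs (b - K) i hin).mp hblt
          rw [hw0]
          split_ifs with hsp <;> omega
      -- one unfolding of altGo
      rw [show altGo asc C K a ((asc.length : Int) - m - 1) j (fuel + 1)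
            = altGo asc C K (a + 1)
                (((asc.length : Int) - m - 1) -
                  (if min C (((asc.length : Int) - m - 1) -
                      innerJ asc (PySem.List.pyGetD asc ((asc.length : Int) - m - 1) 0 - K) j j.toNat + 1) < 1
                    then 1
                    else min C (((asc.length : Int) - m - 1) -
                      innerJ asc (PySem.List.pyGetD asc ((asc.length : Int) - m - 1) 0 - K) j j.toNat + 1)))
                (innerJ asc (PySem.List.pyGetD asc ((asc.length : Int) - m - 1) 0 - K) j j.toNat) fuel from by
          simp only [altGo]
          rw [if_pos hpos]]
      rw [hinner, hg]
      -- the recursive call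
      have harg : ((asc.length : Int) - m - 1) - (1 + ((min (C - 1).toNat w : Nat) : Int))
          = (asc.length : Int) - ((m + (1 + min (C - 1).toNat w) : Nat) : Int) - 1 := by
        push_cast
        omega
      have hm' : m + (1 + min (C - 1).toNat w) ≤ asc.length := by omega
      have hjnext : ∀ hm2 : m + (1 + min (C - 1).toNat w) < asc.length,
          ((asc.countP (fun t => decide (t <
              asc[asc.length - (m + (1 + min (C - 1).toNat w)) - 1]'(by omega) - K)) : Int) ≤ (cP : Int) ∧
            (cP : Int) ≤ (asc.length : Int)) := by
        intro hm2
        constructor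
        · have hanch : asc[asc.length - (m + (1 + min (C - 1).toNat w)) - 1]'(by omega) ≤ b := by
            rw [hbdef]
            exact List.pairwise_iff_getElem.mp hs _ _ (by omega) hin (by omega)
          have hmono := List.countP_mono_left
            (l := asc)
            (p := fun t => decide (t < asc[asc.length - (m + (1 + min (C - 1).toNat w)) - 1]'(by omega) - K))
            (q := fun t => decide (t < b - K))
            (fun t _ hp => by simp only [decide_eq_true_eq] at hp ⊢; omega)
          rw [hcPdef]
          exact_mod_cast hmono
        · rw [hcPdef]
          exact_mod_cast List.countP_le_length
      have hrec := ih (m + (1 + min (C - 1).toNat w)) (a + 1) (cP : Int) hm' (by omega) hjnext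
      rw [harg, hrec]
      -- fold the right-hand side back into buses
      have htail : asc.reverse.drop (m + 1) = (asc.take i).reverse := by
        rw [List.drop_add_one_eq_tail_drop, hdm]
        rfl
      have hdrop2 : ((asc.take i).reverse).drop (min (C - 1).toNat w)
          = asc.reverse.drop (m + (1 + min (C - 1).toNat w)) := by
        rw [← htail, List.drop_drop]
        congr 1
        omega
      rw [hdm, buses, ← hwdef, hdrop2]
      omega
    · have hm : m = asc.length := by omega
      have hneg : ¬ ((0 : Int) ≤ (asc.length : Int) - m - 1) := by omega
      have hdrop : asc.reverse.drop m = [] := List.drop_eq_nil_of_le (by simp; omega)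
      rw [show altGo asc C K a ((asc.length : Int) - m - 1) j (fuel + 1) = a from by
        simp only [altGo]
        rw [if_neg hneg]]
      rw [hdrop]
      simp [buses]

theorem sorted_rev_eq_reverse (T : List Int) :
    PySem.List.sorted T (fun x => x) true = (PySem.List.sorted T (fun x => x) false).reverse := by
  refine List.Perm.eq_of_pairwise (le := fun a b : Int => b ≤ a)
    (fun a b _ _ h1 h2 => le_antisymm h2 h1) ?_ ?_ ?_
  · have := PySem.List.sorted_pairwise_rev T (fun x : Int => x)
    simpa using this
  · refine List.pairwise_reverse.mpr ?_
    have := PySem.List.sorted_pairwise T (fun x : Int => x)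
    simpa using this
  · exact (PySem.List.sorted_perm T (fun x => x) true).trans
      ((PySem.List.sorted_perm T (fun x => x) false).symm.trans
        (List.reverse_perm _).symm)

-- ===== VERDICT (by name: the statement is the Claim_ definition above) =====
theorem solve_spec : Claim_equal_solve := by
  intro N C K T _ hpre
  show solve N C K T = solve_alt N C K T
  have hs : (PySem.List.sorted T (fun x => x) false).Pairwise (· ≤ ·) := by
    have := PySem.List.sorted_pairwise T (fun x : Int => x)
    simpa using this
  have hne : PySem.List.sorted T (fun x => x) false ≠ [] := by
    intro h
    exact hpre ((PySem.List.sorted_eq_nil_iff ..).mp h)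
  obtain ⟨b, rest, hrv⟩ : ∃ b rest, (PySem.List.sorted T (fun x => x) false).reverse = b :: rest := by
    cases h : (PySem.List.sorted T (fun x => x) false).reverse with
    | nil => exact absurd (List.reverse_eq_nil_iff.mp h) hne
    | cons b rest => exact ⟨b, rest, rfl⟩
  have hA : solve N C K T = solveGo C K 1 b 1 rest := by
    unfold solve
    rw [sorted_rev_eq_reverse T, hrv]
  have hB := altGo_eq_buses hs C K (PySem.List.sorted T (fun x => x) false).length 0 0
      ((PySem.List.sorted T (fun x => x) false).length : Int)
      (by omega) (by omega)
      (fun hm => ⟨by exact_mod_cast List.countP_le_length, le_refl _⟩)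
  simp only [Nat.cast_zero, sub_zero, List.drop_zero] at hB
  calc solve N C K T = solveGo C K 1 b 1 rest := hA
    _ = 1 + buses C K (b :: rest) - 1 := solveGo_eq_buses C K rest.length rest (le_refl _) 1 b
    _ = buses C K ((PySem.List.sorted T (fun x => x) false).reverse) := by rw [hrv]; omega
    _ = solve_alt N C K T := by
        show buses C K ((PySem.List.sorted T (fun x => x) false).reverse)
          = altGo (PySem.List.sorted T (fun x => x) false) C K 0
              (((PySem.List.sorted T (fun x => x) false).length : Int) - 1)
              ((PySem.List.sorted T (fun x => x) false).length : Int)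
              (PySem.List.sorted T (fun x => x) false).length
        rw [hB]
        omega

@[simp] theorem solve_raises : Claim_raises_solve := by
  unfold Claim_raises_solve
  exact ⟨fun N C K T _ h => by simpa [Pre_solve, Raises_solve] using h, by decide⟩
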